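-- pv_equiv track=rewrite | github.com/avisanghavi/JARV4 | server/services/linkedin-scraper/linkedin_scraper.py | merge_profiles_by_best_connection
-- ===== SOURCE A (Python) =====
-- def merge_profiles_by_best_connection(profiles):
--     """
--     If the same name appears multiple times, keep whichever has
--     the "highest" connection level: 1st outranks 2nd outranks 3rd+.
--     """
--     level_map = {"1st": 1, "2nd": 2, "3rd": 3, "3rd+": 3}
--     merged = {}
--     for p in profiles:
--         nm = p["name"]
--         if nm not in merged:
--             merged[nm] = p
--         else:
--             old_level = merged[nm]["connection_level"]
--             new_level = p["connection_level"]
--             old_num = level_map.get(old_level, 3)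
--             new_num = level_map.get(new_level, 3)
--             # 1 < 2 < 3 => keep the "lowest" numeric
--             if new_num < old_num:
--                 merged[nm] = p
--     return list(merged.values())
-- ===== SOURCE B (Python) =====
-- def merge_profiles_by_best_connection(profiles):
--     """
--     If the same name appears multiple times, keep whichever has
--     the "highest" connection level: 1st outranks 2nd outranks 3rd+.
--     """
--     level_map = {"1st": 1, "2nd": 2, "3rd": 3, "3rd+": 3}
--     groups = {}
--     for p in profiles:
--         groups.setdefault(p["name"], []).append(p)
--     return [
--         g[0] if len(g) == 1
--         else min(g, key=lambda q: level_map.get(q["connection_level"], 3))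
--         for g in groups.values()
--     ]
-- ===== Notes on version B (the rewrite author's own statement) =====
-- stated objective: alternative
-- what changed: B replaces A's single-pass running keep-the-best dict update by a two-phase decomposition: group all profiles by name into lists first, then take a stable minimum (by connection level) of each group, short-circuiting singleton groups.
import Mathlib
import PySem

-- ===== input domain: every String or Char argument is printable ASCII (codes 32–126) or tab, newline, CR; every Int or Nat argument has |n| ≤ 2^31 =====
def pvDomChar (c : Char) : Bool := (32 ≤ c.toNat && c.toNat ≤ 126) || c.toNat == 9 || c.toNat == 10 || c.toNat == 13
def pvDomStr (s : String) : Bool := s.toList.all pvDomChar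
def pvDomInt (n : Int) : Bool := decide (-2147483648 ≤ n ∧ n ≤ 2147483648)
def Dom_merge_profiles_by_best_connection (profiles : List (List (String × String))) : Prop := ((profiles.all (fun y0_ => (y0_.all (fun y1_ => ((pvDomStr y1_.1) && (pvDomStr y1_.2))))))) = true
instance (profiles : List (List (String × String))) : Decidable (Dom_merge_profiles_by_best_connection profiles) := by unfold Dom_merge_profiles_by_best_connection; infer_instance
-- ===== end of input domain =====

-- B replaces A's running keep-the-best dict by a group-by-name pass followed by a stable
-- minimum per group (objective: alternative decomposition; same asymptotic cost).

-- level_map = {"1st": 1, "2nd": 2, "3rd": 3, "3rd+": 3}  (shared literal of both sources)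
def pvLevelMap : PySem.Dict String Int :=
  PySem.Dict.mk [("1st", 1), ("2nd", 2), ("3rd", 3), ("3rd+", 3)]

-- p["name"] (Pre_ guarantees the key is present, so the default is never the value used)
def pvName (p : List (String × String)) : String := (PySem.Dict.mk p).getD "name" ""

-- level_map.get(p["connection_level"], 3) (Pre_ guarantees "connection_level" is present wherever it is read)
def pvLevel (p : List (String × String)) : Int :=
  pvLevelMap.getD ((PySem.Dict.mk p).getD "connection_level" "") 3

-- ===== PORT A =====
def merge_profiles_by_best_connection (profiles : List (List (String × String))) : List (List (String × String)) :=
  let merged : PySem.Dict String (List (String × String)) :=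
    profiles.foldl (fun merged p =>
      let nm := pvName p
      if merged.contains nm = false then
        merged.insert nm p
      else
        let old_num := pvLevel (merged.getD nm [])
        let new_num := pvLevel p
        if new_num < old_num then merged.insert nm p else merged)
      PySem.Dict.empty
  merged.values

-- ===== PORT B =====
-- min(g, key=…) of Source B: first element is the start, strict '<' keeps the earliest minimum (Python min is stable)
def pvBest (g : List (List (String × String))) : List (String × String) :=
  match g with
  | [] => []
  | a :: rest =>
    if rest.isEmpty then a
    else rest.foldl (fun best q => if pvLevel q < pvLevel best then q else best) a

def merge_profiles_by_best_connection_alt (profiles : List (List (String × String))) : List (List (String × String)) :=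
  let groups : PySem.Dict String (List (List (String × String))) :=
    profiles.foldl (fun groups p => groups.modify (pvName p) [] (· ++ [p])) PySem.Dict.empty
  groups.values.map pvBest

-- ===== PRECONDITION & SPEC =====
-- Pre_ excludes exactly the inputs on which the Python A raises KeyError: a profile without a
-- "name" key, or a profile whose name occurs more than once and which lacks "connection_level".
def Pre_merge_profiles_by_best_connection (profiles : List (List (String × String))) : Prop :=
  (∀ p ∈ profiles, "name" ∈ p.map (·.1)) ∧
  (∀ p ∈ profiles, 2 ≤ profiles.countP (fun q => pvName q == pvName p) →
      "connection_level" ∈ p.map (·.1))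
instance (profiles : List (List (String × String))) : Decidable (Pre_merge_profiles_by_best_connection profiles) := by unfold Pre_merge_profiles_by_best_connection; infer_instance

def pvWitness_merge_profiles_by_best_connection : (List (List (String × String))) :=
  [[("name", "a"), ("connection_level", "2nd")],
   [("name", "b")],
   [("name", "a"), ("connection_level", "1st")]]

def Spec_merge_profiles_by_best_connection (profiles : List (List (String × String))) (out : List (List (String × String))) : Prop := out = merge_profiles_by_best_connection_alt profiles
instance (profiles : List (List (String × String))) (out : List (List (String × String))) : Decidable (Spec_merge_profiles_by_best_connection profiles out) := by unfold Spec_merge_profiles_by_best_connection; infer_instance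

-- ===== CLAIM (what is proved, stated in full; the proofs are below) =====
def Claim_equal_merge_profiles_by_best_connection : Prop := ∀ (profiles : List (List (String × String))), Dom_merge_profiles_by_best_connection profiles → Pre_merge_profiles_by_best_connection profiles → Spec_merge_profiles_by_best_connection profiles (merge_profiles_by_best_connection profiles)

-- ===== LEMMAS AND PROOFS =====

-- A's state is B's state with every group collapsed to its stable minimum.
def pvCollapse (d : PySem.Dict String (List (List (String × String)))) :
    PySem.Dict String (List (String × String)) :=
  PySem.Dict.mk (d.items.map (fun kg => (kg.1, pvBest kg.2)))

theorem pvBest_cons (a : List (String × String)) (rest : List (List (String × String))) :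
    pvBest (a :: rest) = rest.foldl (fun best q => if pvLevel q < pvLevel best then q else best) a := by
  cases rest <;> simp [pvBest]

theorem pvBest_append_singleton (g : List (List (String × String))) (p : List (String × String))
    (hg : g ≠ []) :
    pvBest (g ++ [p]) = if pvLevel p < pvLevel (pvBest g) then p else pvBest g := by
  cases g with
  | nil => exact absurd rfl hg
  | cons a rest => rw [List.cons_append, pvBest_cons, pvBest_cons, List.foldl_append]; simp

theorem pvCollapse_contains (d : PySem.Dict String (List (List (String × String)))) (k : String) :
    (pvCollapse d).contains k = d.contains k := by
  simp [pvCollapse, PySem.Dict.contains, List.any_map, Function.comp_def]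

theorem pvCollapse_keys (d : PySem.Dict String (List (List (String × String)))) :
    (pvCollapse d).keys = d.keys := by
  simp [pvCollapse, PySem.Dict.keys, List.map_map, Function.comp_def]

theorem pvCollapse_get? (d : PySem.Dict String (List (List (String × String)))) (k : String) :
    (pvCollapse d).get? k = (d.get? k).map pvBest := by
  cases d with
  | mk items =>
    induction items with
    | nil => simp [pvCollapse, PySem.Dict.get?]
    | cons a rest ih =>
      by_cases ha : a.1 == k
      · simp [pvCollapse, PySem.Dict.get?, ha]
      · simpa [pvCollapse, PySem.Dict.get?, ha] using ih

theorem pvCollapse_insert (d : PySem.Dict String (List (List (String × String))))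
    (nm : String) (v : List (List (String × String))) :
    pvCollapse (d.insert nm v) = (pvCollapse d).insert nm (pvBest v) := by
  by_cases hc : d.contains nm = true
  · have hcc : (pvCollapse d).contains nm = true := by rw [pvCollapse_contains]; exact hc
    rw [PySem.Dict.insert, PySem.Dict.insert]
    simp only [hc, hcc, if_true]
    unfold pvCollapse
    simp only [List.map_map]
    congr 1
    apply List.map_congr_left
    intro kg _
    by_cases hk : kg.1 = nm <;> simp [hk]
  · have hcf : d.contains nm = false := by simpa using hc
    have hcc : (pvCollapse d).contains nm = false := by
      rw [pvCollapse_contains]; exact hcf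
    rw [PySem.Dict.insert, PySem.Dict.insert]
    simp only [hcf, hcc, Bool.false_eq_true, if_false]
    simp [pvCollapse]

-- overwriting a key with the value already stored there changes nothing (keys unique)
theorem pvInsert_self {ν : Type} (items : List (String × ν)) (k : String) (v : ν)
    (hnd : (PySem.Dict.mk items).keys.Nodup)
    (hv : (PySem.Dict.mk items).get? k = some v) :
    (PySem.Dict.mk items).insert k v = PySem.Dict.mk items := by
  have hct : (PySem.Dict.mk items).contains k = true := by
    rw [PySem.Dict.contains_eq_isSome_get?, hv]; rfl
  rw [PySem.Dict.insert, hct]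
  simp only [if_true]
  apply PySem.Dict.ext
  have hid : List.map (fun p => if (p.1 == k) = true then (k, v) else p) items
      = List.map id items := by
    apply List.map_congr_left
    intro p hp
    by_cases hpk : p.1 == k
    · have hk : p.1 = k := by simpa using hpk
      have hmem : (k, p.2) ∈ items := by rw [← hk]; exact hp
      have h2 : (PySem.Dict.mk items).get? k = some p.2 :=
        PySem.Dict.get?_of_mem_items _ hmem hnd
      have hv2 : v = p.2 := by rw [hv] at h2; exact (Option.some.inj h2)
      simp [← hk, hv2]
    · simp [hpk]
  rw [hid, List.map_id]

theorem pvModify_keys_nodup (d : PySem.Dict String (List (List (String × String))))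
    (p : List (String × String)) (hnd : d.keys.Nodup) :
    (d.modify (pvName p) [] (· ++ [p])).keys.Nodup := by
  rw [PySem.Dict.modify]
  by_cases hc : d.contains (pvName p) = true
  · rw [PySem.Dict.keys_insert_of_contains _ _ hc]; exact hnd
  · rw [PySem.Dict.keys_insert_of_not_contains _ _ (by simpa using hc)]
    refine List.nodup_append.mpr ⟨hnd, List.nodup_singleton _, ?_⟩
    intro x hx y hy
    rw [List.mem_singleton] at hy
    subst hy
    intro hxy
    subst hxy
    exact absurd ((PySem.Dict.contains_iff_mem_keys _ _).mpr hx) (by simpa using hc)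

theorem pvCollapse_step (d : PySem.Dict String (List (List (String × String))))
    (p : List (String × String))
    (hne : ∀ kg ∈ d.items, kg.2 ≠ []) (hnd : d.keys.Nodup) :
    (let nm := pvName p
     if (pvCollapse d).contains nm = false then
       (pvCollapse d).insert nm p
     else
       let old_num := pvLevel ((pvCollapse d).getD nm [])
       let new_num := pvLevel p
       if new_num < old_num then (pvCollapse d).insert nm p else pvCollapse d)
    = pvCollapse (d.modify (pvName p) [] (· ++ [p])) := by
  set nm := pvName p with hnm
  rw [PySem.Dict.modify, pvCollapse_insert]
  by_cases hc : d.contains nm = true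
  · have hcc : (pvCollapse d).contains nm = true := by rw [pvCollapse_contains]; exact hc
    obtain ⟨g, hg⟩ : ∃ g, d.get? nm = some g := by
      rw [PySem.Dict.contains_eq_isSome_get?] at hc
      exact Option.isSome_iff_exists.mp hc
    have hgd : d.getD nm [] = g := by simp [PySem.Dict.getD, hg]
    have hgne : g ≠ [] := by
      have := PySem.Dict.mem_items_of_get?_eq_some _ hg
      exact hne _ this
    have hgetD : (pvCollapse d).getD nm [] = pvBest g := by
      simp [PySem.Dict.getD, pvCollapse_get?, hg]
    simp only [hcc, Bool.true_eq_false, if_false, hgetD, hgd]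
    rw [pvBest_append_singleton _ _ hgne]
    by_cases hlt : pvLevel p < pvLevel (pvBest g)
    · simp [hlt]
    · simp only [hlt, if_false]
      refine (pvInsert_self (pvCollapse d).items nm (pvBest g) ?_ ?_).symm
      · rw [pvCollapse_keys]; exact hnd
      · rw [pvCollapse_get?, hg]; rfl
  · have hcc : (pvCollapse d).contains nm = false := by
      rw [pvCollapse_contains]; simpa using hc
    have hgd : d.getD nm [] = [] :=
      PySem.Dict.getD_of_not_contains _ _ (by simpa using hc)
    simp [hcc, hgd, pvBest]

theorem pvModify_nonempty (d : PySem.Dict String (List (List (String × String))))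
    (p : List (String × String))
    (hne : ∀ kg ∈ d.items, kg.2 ≠ []) :
    ∀ kg ∈ (d.modify (pvName p) [] (· ++ [p])).items, kg.2 ≠ [] := by
  intro kg hmem
  rw [PySem.Dict.modify, PySem.Dict.insert] at hmem
  by_cases hc : d.contains (pvName p) = true
  · simp only [hc, if_true] at hmem
    obtain ⟨kg0, hm0, heq⟩ := List.mem_map.mp hmem
    by_cases hk : kg0.1 == pvName p
    · simp [hk] at heq; simp [← heq]
    · simp only [hk, Bool.false_eq_true, if_false] at heq
      exact heq ▸ hne kg0 hm0
  · simp only [hc] at hmem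
    rcases List.mem_append.mp hmem with h | h
    · exact hne kg h
    · simp at h; simp [h]

theorem pvCollapse_foldl (l : List (List (String × String)))
    (d : PySem.Dict String (List (List (String × String))))
    (hne : ∀ kg ∈ d.items, kg.2 ≠ []) (hnd : d.keys.Nodup) :
    l.foldl (fun merged p =>
      let nm := pvName p
      if merged.contains nm = false then
        merged.insert nm p
      else
        let old_num := pvLevel (merged.getD nm [])
        let new_num := pvLevel p
        if new_num < old_num then merged.insert nm p else merged)
      (pvCollapse d)
    = pvCollapse (l.foldl (fun groups p => groups.modify (pvName p) [] (· ++ [p])) d) := by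
  induction l generalizing d with
  | nil => rfl
  | cons p rest ih =>
    simp only [List.foldl_cons]
    rw [← ih (d.modify (pvName p) [] (· ++ [p])) (pvModify_nonempty d p hne)
        (pvModify_keys_nodup d p hnd),
      ← pvCollapse_step d p hne hnd]

-- ===== VERDICT (by name: the statement is the Claim_ definition above) =====
theorem merge_profiles_by_best_connection_spec : Claim_equal_merge_profiles_by_best_connection := by
  intro profiles _ _
  unfold Spec_merge_profiles_by_best_connection
  unfold merge_profiles_by_best_connection merge_profiles_by_best_connection_alt
  have h0 : (PySem.Dict.empty : PySem.Dict String (List (String × String)))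
      = pvCollapse PySem.Dict.empty := rfl
  rw [h0, pvCollapse_foldl profiles PySem.Dict.empty (by simp [PySem.Dict.empty])
    (by simp [PySem.Dict.empty, PySem.Dict.keys])]
  simp [pvCollapse, PySem.Dict.values, List.map_map, Function.comp_def]
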